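-- pv_equiv track=rewrite | github.com/e-tregubov/Walking-Password-Calculator | walking_password_calc.py | password_shifted
-- ===== SOURCE A (Python) =====
-- usual_keys = "`1234567890-=qwertyuiop[]\\asdfghjkl;'zxcvbnm,./"
--
-- shift_keys = "~!@#$%^&*()_+QWERTYUIOP{}|ASDFGHJKL:\"ZXCVBNM<>?"
--
-- key_reverse = {**dict(zip(usual_keys, shift_keys)), **dict(zip(shift_keys, usual_keys))}
--
-- def password_shifted(password):
--     # Creating 'shifted' versions:
--     # Getting all password variants in binary list of password
--     # Example: '**' = ['00','01','10','11'] - 1 is shifted, 0 is not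
--     binary_list = []
--     pass_count = 2 ** len(password)
--     for i in range(pass_count):
--         binary_list.append(str(format((pass_count + i), 'b')[1:]))
--
--     password = [*password]
--     pass_list = []
--
--     # Getting all password versions according to binary list
--     for binary_pattern in binary_list:
--         for n, digit in enumerate(binary_pattern):
--             if digit == '1' and password[n] in usual_keys:
--                 password[n] = key_reverse[password[n]]
--             if digit == '0' and password[n] in shift_keys:
--                 password[n] = key_reverse[password[n]]
--         # Convert password into string and adding into password list
--         password_string = ''
--         for key in password:
--             password_string += key
--         pass_list.append(password_string)
--
--     return pass_list
-- ===== SOURCE B (Python) =====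
-- usual_keys = "`1234567890-=qwertyuiop[]\\asdfghjkl;'zxcvbnm,./"
--
-- shift_keys = "~!@#$%^&*()_+QWERTYUIOP{}|ASDFGHJKL:\"ZXCVBNM<>?"
--
-- key_reverse = {**dict(zip(usual_keys, shift_keys)), **dict(zip(shift_keys, usual_keys))}
--
-- def password_shifted(password):
--     # One left-to-right pass: for each character keep its (unshifted, shifted)
--     # pair and extend every variant built so far with both choices.
--     variants = ['']
--     for ch in password:
--         if ch in usual_keys:
--             pair = (ch, key_reverse[ch])
--         elif ch in shift_keys:
--             pair = (key_reverse[ch], ch)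
--         else:
--             pair = (ch, ch)
--         variants = [v + c for v in variants for c in pair]
--     return variants
-- ===== Notes on version B (the rewrite author's own statement) =====
-- stated objective: simpler
-- what changed: B drops A's binary-pattern list and in-place password mutation entirely: one left-to-right pass computes each character's (unshifted, shifted) pair and extends every variant built so far with both choices.
import Mathlib
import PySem

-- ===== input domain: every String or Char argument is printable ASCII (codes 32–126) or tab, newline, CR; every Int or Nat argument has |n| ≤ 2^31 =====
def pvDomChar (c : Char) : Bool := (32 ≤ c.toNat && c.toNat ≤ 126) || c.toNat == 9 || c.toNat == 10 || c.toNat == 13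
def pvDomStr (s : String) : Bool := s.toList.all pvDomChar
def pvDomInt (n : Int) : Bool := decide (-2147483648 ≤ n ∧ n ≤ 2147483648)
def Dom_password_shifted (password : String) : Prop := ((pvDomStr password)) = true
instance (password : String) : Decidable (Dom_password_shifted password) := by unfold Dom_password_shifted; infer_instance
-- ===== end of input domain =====

-- B replaces A's binary-pattern bookkeeping and in-place mutation with a single
-- left-to-right pass extending each variant by both key choices (objective: simpler).

-- ===== PORT A =====
def usualKeys : List Char := "`1234567890-=qwertyuiop[]\\asdfghjkl;'zxcvbnm,./".toList
def shiftKeys : List Char := "~!@#$%^&*()_+QWERTYUIOP{}|ASDFGHJKL:\"ZXCVBNM<>?".toList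
def keyReverse : PySem.Dict Char Char :=
  PySem.Dict.ofList ((usualKeys.zip shiftKeys) ++ (shiftKeys.zip usualKeys))

-- key_reverse[x]; in A it is only evaluated under a membership guard, so the
-- lookup always succeeds and the default is never reached.
def revKey (x : Char) : Char := (keyReverse.get? x).getD x

-- format(n, 'b') as a list of chars (hand port; A only calls it with n ≥ 1,
-- where this is exact).
def natToBin : Nat → List Char
  | 0 => []
  | n + 1 => natToBin ((n + 1) / 2) ++ [if (n + 1) % 2 = 1 then '1' else '0']
decreasing_by exact Nat.div_lt_self (Nat.succ_pos n) (by omega)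

-- the body of A's inner `for n, digit in enumerate(binary_pattern)` loop: the
-- two sequential ifs applied to one character
def stepA (d x : Char) : Char :=
  let x1 := if d = '1' ∧ x ∈ usualKeys then revKey x else x
  if d = '0' ∧ x1 ∈ shiftKeys then revKey x1 else x1

-- the inner loop itself: update position n by digit n, for each pattern digit
def applyPattern : List Char → List Char → List Char
  | d :: ds, x :: xs => stepA d x :: applyPattern ds xs
  | _, xs => xs

def password_shifted (password : String) : List String :=
  let xs := password.toList
  let passCount := 2 ^ xs.length
  let binaryList := (List.range passCount).map (fun i => (natToBin (passCount + i)).drop 1)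
  (binaryList.foldl
    (fun (st : List Char × List String) p =>
      let pw := applyPattern p st.1
      (pw, st.2 ++ [String.ofList pw]))
    (xs, [])).2

-- ===== PORT B =====
-- the (unshifted, shifted) pair chosen for one character
def pairOf (c : Char) : Char × Char :=
  if c ∈ usualKeys then (c, revKey c)
  else if c ∈ shiftKeys then (revKey c, c)
  else (c, c)

def password_shifted_alt (password : String) : List String :=
  (password.toList.foldl
    (fun (variants : List (List Char)) ch =>
      variants.flatMap (fun v => [v ++ [(pairOf ch).1], v ++ [(pairOf ch).2]]))
    [[]]).map String.ofList

-- ===== PRECONDITION & SPEC =====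
def Spec_password_shifted (password : String) (out : List String) : Prop := out = password_shifted_alt password
instance (password : String) (out : List String) : Decidable (Spec_password_shifted password out) := by unfold Spec_password_shifted; infer_instance

-- ===== CLAIM (what is proved, stated in full; the proofs are below) =====
def Claim_equal_password_shifted : Prop := ∀ (password : String), Dom_password_shifted password → Spec_password_shifted password (password_shifted password)

-- ===== LEMMAS AND PROOFS =====

-- "set to shifted" / "set to unshifted" on one character
def shiftOf (x : Char) : Char := if x ∈ usualKeys then revKey x else x
def unshiftOf (x : Char) : Char := if x ∈ shiftKeys then revKey x else x

-- reference list of all variants, most-significant position first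
def allCombos : List Char → List (List Char)
  | [] => [[]]
  | x :: xs => (allCombos xs).map (unshiftOf x :: ·) ++ (allCombos xs).map (shiftOf x :: ·)

-- the n-bit binary representation of i (i < 2^n), msb first
def pad : Nat → Nat → List Char
  | 0, _ => []
  | k + 1, i => pad k (i / 2) ++ [if i % 2 = 1 then '1' else '0']

-- finite facts about the two key rows and the reverse dict
set_option maxRecDepth 20000 in
lemma usual_facts_bool : (usualKeys.all (fun c =>
    shiftKeys.contains (revKey c) && !(usualKeys.contains (revKey c))
      && (revKey (revKey c) == c) && !(shiftKeys.contains c))) = true := by rfl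

set_option maxRecDepth 20000 in
lemma shift_facts_bool : (shiftKeys.all (fun c =>
    usualKeys.contains (revKey c) && !(shiftKeys.contains (revKey c))
      && (revKey (revKey c) == c) && !(usualKeys.contains c))) = true := by rfl

lemma usual_facts : ∀ c ∈ usualKeys,
    revKey c ∈ shiftKeys ∧ revKey c ∉ usualKeys ∧ revKey (revKey c) = c ∧ c ∉ shiftKeys := by
  have h := usual_facts_bool
  rw [List.all_eq_true] at h
  intro c hc
  have hx := h c hc
  rw [Bool.and_eq_true, Bool.and_eq_true, Bool.and_eq_true] at hx
  obtain ⟨⟨⟨h1, h2⟩, h3⟩, h4⟩ := hx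
  refine ⟨List.mem_of_elem_eq_true h1, ?_, eq_of_beq h3, ?_⟩
  · intro hm
    rw [Bool.not_eq_eq_eq_not, Bool.not_true] at h2
    have he := List.elem_eq_true_of_mem hm
    rw [show usualKeys.contains (revKey c) = List.elem (revKey c) usualKeys from rfl] at h2
    rw [h2] at he
    exact Bool.noConfusion he
  · intro hm
    rw [Bool.not_eq_eq_eq_not, Bool.not_true] at h4
    have he := List.elem_eq_true_of_mem hm
    rw [show shiftKeys.contains c = List.elem c shiftKeys from rfl] at h4
    rw [h4] at he
    exact Bool.noConfusion he

lemma shift_facts : ∀ c ∈ shiftKeys,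
    revKey c ∈ usualKeys ∧ revKey c ∉ shiftKeys ∧ revKey (revKey c) = c ∧ c ∉ usualKeys := by
  have h := shift_facts_bool
  rw [List.all_eq_true] at h
  intro c hc
  have hx := h c hc
  rw [Bool.and_eq_true, Bool.and_eq_true, Bool.and_eq_true] at hx
  obtain ⟨⟨⟨h1, h2⟩, h3⟩, h4⟩ := hx
  refine ⟨List.mem_of_elem_eq_true h1, ?_, eq_of_beq h3, ?_⟩
  · intro hm
    rw [Bool.not_eq_eq_eq_not, Bool.not_true] at h2
    have he := List.elem_eq_true_of_mem hm
    rw [show shiftKeys.contains (revKey c) = List.elem (revKey c) shiftKeys from rfl] at h2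
    rw [h2] at he
    exact Bool.noConfusion he
  · intro hm
    rw [Bool.not_eq_eq_eq_not, Bool.not_true] at h4
    have he := List.elem_eq_true_of_mem hm
    rw [show usualKeys.contains c = List.elem c usualKeys from rfl] at h4
    rw [h4] at he
    exact Bool.noConfusion he

lemma shiftOf_shiftOf (x : Char) : shiftOf (shiftOf x) = shiftOf x := by
  unfold shiftOf
  by_cases h : x ∈ usualKeys
  · simp [h, (usual_facts x h).2.1]
  · simp [h]

lemma shiftOf_unshiftOf (x : Char) : shiftOf (unshiftOf x) = shiftOf x := by
  unfold shiftOf unshiftOf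
  by_cases h : x ∈ shiftKeys
  · simp [h, (shift_facts x h).1, (shift_facts x h).2.2.1, (shift_facts x h).2.2.2]
  · simp [h]

lemma unshiftOf_unshiftOf (x : Char) : unshiftOf (unshiftOf x) = unshiftOf x := by
  unfold unshiftOf
  by_cases h : x ∈ shiftKeys
  · simp [h, (shift_facts x h).2.1]
  · simp [h]

lemma unshiftOf_shiftOf (x : Char) : unshiftOf (shiftOf x) = unshiftOf x := by
  unfold shiftOf unshiftOf
  by_cases h : x ∈ usualKeys
  · simp [h, (usual_facts x h).1, (usual_facts x h).2.2.1, (usual_facts x h).2.2.2]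
  · simp [h]

lemma stepA_one (x : Char) : stepA '1' x = shiftOf x := by
  unfold stepA shiftOf
  by_cases h : x ∈ usualKeys <;> simp [h]

lemma stepA_zero (x : Char) : stepA '0' x = unshiftOf x := by
  unfold stepA unshiftOf
  by_cases h : x ∈ shiftKeys <;> simp [h]

-- a bit-digit step absorbs any previous step on the same character
lemma stepA_absorb (d e x : Char) (hd : d = '0' ∨ d = '1') :
    stepA d (stepA e x) = stepA d x := by
  have he : stepA e x = shiftOf x ∨ stepA e x = unshiftOf x ∨ stepA e x = x := by
    by_cases h1 : e = '1'
    · exact .inl (h1 ▸ stepA_one x)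
    · by_cases h0 : e = '0'
      · exact .inr (.inl (h0 ▸ stepA_zero x))
      · right; right; unfold stepA; simp [h0, h1]
  rcases hd with hd | hd <;> subst hd
  · rcases he with h | h | h <;>
      rw [stepA_zero, stepA_zero, h] <;>
      simp [unshiftOf_shiftOf, unshiftOf_unshiftOf]
  · rcases he with h | h | h <;>
      rw [stepA_one, stepA_one, h] <;>
      simp [shiftOf_shiftOf, shiftOf_unshiftOf]

def BitsOnly (p : List Char) : Prop := ∀ d ∈ p, d = '0' ∨ d = '1'

lemma applyPattern_absorb : ∀ (q p t : List Char), BitsOnly q → q.length = p.length →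
    applyPattern q (applyPattern p t) = applyPattern q t
  | [], p, t, _, hl => by
    have : p = [] := List.eq_nil_of_length_eq_zero hl.symm
    subst this; rfl
  | d :: ds, [], t, _, hl => by simp at hl
  | d :: ds, e :: es, [], _, _ => by simp [applyPattern]
  | d :: ds, e :: es, x :: ts, hb, hl => by
    simp only [applyPattern]
    rw [stepA_absorb d e x (hb d (by simp)),
      applyPattern_absorb ds es ts (fun c hc => hb c (by simp [hc])) (by simpa using hl)]

lemma pad_bits : ∀ k i, BitsOnly (pad k i)
  | 0, i => by intro d hd; simp [pad] at hd
  | k + 1, i => by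
    intro d hd
    simp only [pad, List.mem_append, List.mem_singleton] at hd
    rcases hd with h | h
    · exact pad_bits k (i / 2) d h
    · subst h; split <;> simp

lemma pad_length : ∀ k i, (pad k i).length = k
  | 0, _ => rfl
  | k + 1, i => by simp [pad, pad_length k]

lemma pad_lo : ∀ k i, i < 2 ^ k → pad (k + 1) i = '0' :: pad k i
  | 0, i, h => by
    interval_cases i
    simp [pad]
  | k + 1, i, h => by
    have h2 : i / 2 < 2 ^ k := by omega
    show pad (k + 1) (i / 2) ++ _ = '0' :: pad (k + 1) i
    rw [pad_lo k (i / 2) h2]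
    simp [pad]

lemma pad_hi : ∀ k j, j < 2 ^ k → pad (k + 1) (2 ^ k + j) = '1' :: pad k j
  | 0, j, h => by
    interval_cases j
    simp [pad]
  | k + 1, j, h => by
    have e1 : (2 ^ (k + 1) + j) / 2 = 2 ^ k + j / 2 := by
      have : 2 ^ (k + 1) = 2 * 2 ^ k := by ring
      omega
    have e2 : (2 ^ (k + 1) + j) % 2 = j % 2 := by
      have : 2 ^ (k + 1) = 2 * 2 ^ k := by ring
      omega
    have h2 : j / 2 < 2 ^ k := by omega
    show pad (k + 1) ((2 ^ (k + 1) + j) / 2) ++ [if (2 ^ (k + 1) + j) % 2 = 1 then '1' else '0']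
        = '1' :: pad (k + 1) j
    rw [e1, e2, pad_hi k (j / 2) h2]
    simp [pad]

lemma natToBin_pos (n : Nat) (h : 0 < n) :
    natToBin n = natToBin (n / 2) ++ [if n % 2 = 1 then '1' else '0'] := by
  cases n with
  | zero => omega
  | succ m => rw [natToBin]

lemma natToBin_pow_add : ∀ k i, i < 2 ^ k → natToBin (2 ^ k + i) = '1' :: pad k i
  | 0, i, h => by
    interval_cases i
    rw [show (2:ℕ) ^ 0 + 0 = 1 from rfl, natToBin_pos 1 one_pos]
    simp [natToBin, pad]
  | k + 1, i, h => by
    have e1 : (2 ^ (k + 1) + i) / 2 = 2 ^ k + i / 2 := by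
      have : 2 ^ (k + 1) = 2 * 2 ^ k := by ring
      omega
    have e2 : (2 ^ (k + 1) + i) % 2 = i % 2 := by
      have : 2 ^ (k + 1) = 2 * 2 ^ k := by ring
      omega
    rw [natToBin_pos _ (by positivity), e1, e2,
      natToBin_pow_add k (i / 2) (by omega)]
    simp [pad]

-- A's threaded state never matters: fold result characterisation
lemma foldA_eq (xs : List Char) :
    ∀ (ps : List (List Char)) (s : List Char) (acc : List String),
    (∀ p ∈ ps, BitsOnly p ∧ p.length = xs.length) →
    (∀ p, BitsOnly p → p.length = xs.length → applyPattern p s = applyPattern p xs) →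
    (ps.foldl (fun (st : List Char × List String) p =>
        let pw := applyPattern p st.1
        (pw, st.2 ++ [String.ofList pw])) (s, acc)).2
      = acc ++ ps.map (fun p => String.ofList (applyPattern p xs))
  | [], s, acc, _, _ => by simp
  | p :: ps, s, acc, hps, hs => by
    have hp := hps p (by simp)
    have hsp : applyPattern p s = applyPattern p xs := hs p hp.1 hp.2
    simp only [List.foldl_cons, List.map_cons]
    rw [foldA_eq xs ps _ _ (fun q hq => hps q (by simp [hq]))]
    · simp [hsp]
    · intro q hqb hql
      rw [hsp, applyPattern_absorb q p xs hqb (by rw [hql, hp.2])]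

lemma map_pad_eq_allCombos : ∀ xs : List Char,
    (List.range (2 ^ xs.length)).map (fun i => applyPattern (pad xs.length i) xs)
      = allCombos xs
  | [] => by simp [pad, applyPattern, allCombos]
  | x :: xs => by
    have hsplit : 2 ^ (x :: xs).length = 2 ^ xs.length + 2 ^ xs.length := by
      simp [List.length_cons, pow_succ]; ring
    rw [hsplit, List.range_add, List.map_append, List.map_map]
    have hlo : (List.range (2 ^ xs.length)).map
        (fun i => applyPattern (pad (x :: xs).length i) (x :: xs))
        = (List.range (2 ^ xs.length)).map
          (fun i => unshiftOf x :: applyPattern (pad xs.length i) xs) := by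
      apply List.map_congr_left
      intro i hi
      rw [List.mem_range] at hi
      show applyPattern (pad (xs.length + 1) i) (x :: xs) = _
      rw [pad_lo xs.length i hi]
      simp [applyPattern, stepA_zero]
    have hhi : (List.range (2 ^ xs.length)).map
        ((fun i => applyPattern (pad (x :: xs).length i) (x :: xs)) ∘
          (fun i => 2 ^ xs.length + i))
        = (List.range (2 ^ xs.length)).map
          (fun i => shiftOf x :: applyPattern (pad xs.length i) xs) := by
      apply List.map_congr_left
      intro i hi
      rw [List.mem_range] at hi
      show applyPattern (pad (xs.length + 1) (2 ^ xs.length + i)) (x :: xs) = _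
      rw [pad_hi xs.length i hi]
      simp [applyPattern, stepA_one]
    rw [hlo, hhi, allCombos]
    rw [← map_pad_eq_allCombos xs]
    simp [List.map_map, Function.comp_def]

lemma pairOf_eq (c : Char) : pairOf c = (unshiftOf c, shiftOf c) := by
  unfold pairOf unshiftOf shiftOf
  by_cases hu : c ∈ usualKeys
  · simp [hu, (usual_facts c hu).2.2.2]
  · by_cases hs : c ∈ shiftKeys
    · simp [hu, hs]
    · simp [hu, hs]

lemma foldB_eq : ∀ (xs : List Char) (A : List (List Char)),
    xs.foldl (fun (variants : List (List Char)) ch =>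
        variants.flatMap (fun v => [v ++ [(pairOf ch).1], v ++ [(pairOf ch).2]])) A
      = A.flatMap (fun v => (allCombos xs).map (v ++ ·))
  | [], A => by simp [allCombos]
  | x :: xs, A => by
    simp only [List.foldl_cons]
    rw [foldB_eq xs, List.flatMap_assoc]
    simp [allCombos, pairOf_eq, List.map_append, List.map_map, Function.comp_def,
      List.append_assoc]

-- main bridge lemmas
lemma binary_list_eq (n : Nat) :
    (List.range (2 ^ n)).map (fun i => (natToBin (2 ^ n + i)).drop 1)
      = (List.range (2 ^ n)).map (pad n) := by
  apply List.map_congr_left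
  intro i hi
  rw [List.mem_range] at hi
  rw [natToBin_pow_add n i hi]
  rfl

lemma password_shifted_eq (password : String) :
    password_shifted password = (allCombos password.toList).map String.ofList := by
  unfold password_shifted
  simp only [binary_list_eq password.toList.length]
  rw [foldA_eq password.toList]
  · rw [List.nil_append, List.map_map, ← map_pad_eq_allCombos password.toList, List.map_map]
    rfl
  · intro p hp
    simp only [List.mem_map, List.mem_range] at hp
    obtain ⟨i, hi, rfl⟩ := hp
    exact ⟨pad_bits _ _, pad_length _ _⟩
  · intro p _ _
    rfl

lemma password_shifted_alt_eq (password : String) :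
    password_shifted_alt password = (allCombos password.toList).map String.ofList := by
  unfold password_shifted_alt
  rw [foldB_eq password.toList]
  simp

-- ===== VERDICT (by name: the statement is the Claim_ definition above) =====
theorem password_shifted_spec : Claim_equal_password_shifted := by
  intro password _
  unfold Spec_password_shifted
  rw [password_shifted_eq, password_shifted_alt_eq]
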